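-- pv_equiv track=rewrite | github.com/Kanik0575/automated_taxonomy_project_final | src/taxonomy.py | _suggest_label
-- ===== SOURCE A (Python) =====
-- TACTIC_KEYWORDS: dict[str, list[str]] = {
--     "Reconnaissance":       ["reconnaissance", "osint", "scanning", "footprint"],
--     "Resource Development": ["infrastructure", "domain generation", "dga", "staging"],
--     "Initial Access":       ["phishing", "spearphishing", "initial access", "supply chain", "exploit"],
--     "Execution":            ["execution", "powershell", "script", "living off the land", "lolbin"],
--     "Persistence":          ["persistence", "web shell", "registry", "startup", "backdoor"],
--     "Privilege Escalation": ["privilege escalation", "token", "kernel exploit"],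
--     "Defense Evasion":      ["evasion", "obfuscation", "rootkit", "anti-forensic", "timestomp"],
--     "Credential Access":    ["credential", "password", "lsass", "kerberoasting", "hash"],
--     "Discovery":            ["discovery", "enumeration", "active directory", "ldap"],
--     "Lateral Movement":     ["lateral movement", "pass the hash", "pass the ticket", "rdp", "smb"],
--     "Collection":           ["collection", "keylog", "screen capture", "staged data"],
--     "Command and Control":  ["command and control", "c2", "beacon", "dns tunnel",
--                              "jaspi", "ja3", "covert channel", "exfiltration channel"],
--     "Exfiltration":         ["exfiltration", "data exfiltration", "covert exfil",
--                              "cloud storage", "low and slow"],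
--     "Impact":               ["wiper", "ransomware", "destructive", "ics", "scada"],
--     "Detection Methods":    ["anomaly detection", "classifier", "neural network",
--                              "graph neural", "lstm", "transformer", "bert", "federated"],
--     "Attribution":          ["attribution", "threat actor", "apt group", "tactic technique"],
--     "Survey/Review":        ["survey", "systematic review", "literature review", "overview"],
-- }
--
-- def _suggest_label(top_terms: list[str]) -> str:
--     """Pick the MITRE-like tactic whose keywords best match the top terms."""
--     if not top_terms:
--         return "Unclassified"
--     joined = " ".join(top_terms).lower()
--     scores: dict[str, int] = {}
--     for tactic, keywords in TACTIC_KEYWORDS.items():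
--         score = sum(1 for kw in keywords if kw in joined)
--         if score > 0:
--             scores[tactic] = score
--     if not scores:
--         return "Unclassified (inspect top terms)"
--     # If there's a tie, concat the top two
--     best = sorted(scores.items(), key=lambda x: -x[1])
--     if len(best) > 1 and best[0][1] == best[1][1]:
--         return f"{best[0][0]} / {best[1][0]}"
--     return best[0][0]
-- ===== SOURCE B (Python) =====
-- TACTIC_KEYWORDS: dict[str, list[str]] = {
--     "Reconnaissance":       ["reconnaissance", "osint", "scanning", "footprint"],
--     "Resource Development": ["infrastructure", "domain generation", "dga", "staging"],
--     "Initial Access":       ["phishing", "spearphishing", "initial access", "supply chain", "exploit"],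
--     "Execution":            ["execution", "powershell", "script", "living off the land", "lolbin"],
--     "Persistence":          ["persistence", "web shell", "registry", "startup", "backdoor"],
--     "Privilege Escalation": ["privilege escalation", "token", "kernel exploit"],
--     "Defense Evasion":      ["evasion", "obfuscation", "rootkit", "anti-forensic", "timestomp"],
--     "Credential Access":    ["credential", "password", "lsass", "kerberoasting", "hash"],
--     "Discovery":            ["discovery", "enumeration", "active directory", "ldap"],
--     "Lateral Movement":     ["lateral movement", "pass the hash", "pass the ticket", "rdp", "smb"],
--     "Collection":           ["collection", "keylog", "screen capture", "staged data"],
--     "Command and Control":  ["command and control", "c2", "beacon", "dns tunnel",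
--                              "jaspi", "ja3", "covert channel", "exfiltration channel"],
--     "Exfiltration":         ["exfiltration", "data exfiltration", "covert exfil",
--                              "cloud storage", "low and slow"],
--     "Impact":               ["wiper", "ransomware", "destructive", "ics", "scada"],
--     "Detection Methods":    ["anomaly detection", "classifier", "neural network",
--                              "graph neural", "lstm", "transformer", "bert", "federated"],
--     "Attribution":          ["attribution", "threat actor", "apt group", "tactic technique"],
--     "Survey/Review":        ["survey", "systematic review", "literature review", "overview"],
-- }
--
-- def _suggest_label(top_terms: list[str]) -> str:
--     """Pick the MITRE-like tactic whose keywords best match the top terms."""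
--     if not top_terms:
--         return "Unclassified"
--     joined = " ".join(top_terms).lower()
--     # Single streaming pass: no score dict, no sort.  Track the best score seen,
--     # the first tactic attaining it, and (for ties) the second one.
--     best = 0
--     first = None
--     second = None
--     for tactic, keywords in TACTIC_KEYWORDS.items():
--         score = len([kw for kw in keywords if kw in joined])
--         if score > best:
--             best, first, second = score, tactic, None
--         elif score == best and score > 0 and second is None:
--             second = tactic
--     if first is None:
--         return "Unclassified (inspect top terms)"
--     if second is not None:
--         return f"{first} / {second}"
--     return first
-- ===== Notes on version B (the rewrite author's own statement) =====
-- stated objective: alternative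
-- what changed: B drops A's score dict and sort entirely: a single streaming pass over the tactic table keeps only (best score, first tactic attaining it, second tied tactic), deciding the tie inline instead of sorting the collected scores.
import Mathlib
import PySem

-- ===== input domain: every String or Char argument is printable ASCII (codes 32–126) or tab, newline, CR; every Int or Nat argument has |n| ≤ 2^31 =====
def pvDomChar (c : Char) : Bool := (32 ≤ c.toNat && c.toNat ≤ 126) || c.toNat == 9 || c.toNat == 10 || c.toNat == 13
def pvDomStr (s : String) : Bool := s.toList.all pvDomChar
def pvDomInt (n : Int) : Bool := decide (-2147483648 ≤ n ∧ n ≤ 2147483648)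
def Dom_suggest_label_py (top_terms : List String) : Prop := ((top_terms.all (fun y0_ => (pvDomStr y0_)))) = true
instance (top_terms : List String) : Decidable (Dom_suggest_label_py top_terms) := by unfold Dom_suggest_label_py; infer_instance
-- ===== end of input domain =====

-- B replaces A's collect-into-a-dict-then-sort strategy by one streaming pass that
-- keeps only (best score, first tactic attaining it, second tied tactic); objective:
-- alternative (no dict, no sort), same cost overall.

-- ===== PORT A =====
-- module constant TACTIC_KEYWORDS (shared by both ports, like the Python module constant)
def tacticKeywords : List (String × List String) :=
  [ ("Reconnaissance",       ["reconnaissance", "osint", "scanning", "footprint"]),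
    ("Resource Development", ["infrastructure", "domain generation", "dga", "staging"]),
    ("Initial Access",       ["phishing", "spearphishing", "initial access", "supply chain", "exploit"]),
    ("Execution",            ["execution", "powershell", "script", "living off the land", "lolbin"]),
    ("Persistence",          ["persistence", "web shell", "registry", "startup", "backdoor"]),
    ("Privilege Escalation", ["privilege escalation", "token", "kernel exploit"]),
    ("Defense Evasion",      ["evasion", "obfuscation", "rootkit", "anti-forensic", "timestomp"]),
    ("Credential Access",    ["credential", "password", "lsass", "kerberoasting", "hash"]),
    ("Discovery",            ["discovery", "enumeration", "active directory", "ldap"]),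
    ("Lateral Movement",     ["lateral movement", "pass the hash", "pass the ticket", "rdp", "smb"]),
    ("Collection",           ["collection", "keylog", "screen capture", "staged data"]),
    ("Command and Control",  ["command and control", "c2", "beacon", "dns tunnel",
                              "jaspi", "ja3", "covert channel", "exfiltration channel"]),
    ("Exfiltration",         ["exfiltration", "data exfiltration", "covert exfil",
                              "cloud storage", "low and slow"]),
    ("Impact",               ["wiper", "ransomware", "destructive", "ics", "scada"]),
    ("Detection Methods",    ["anomaly detection", "classifier", "neural network",
                              "graph neural", "lstm", "transformer", "bert", "federated"]),
    ("Attribution",          ["attribution", "threat actor", "apt group", "tactic technique"]),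
    ("Survey/Review",        ["survey", "systematic review", "literature review", "overview"]) ]

-- A's score-building loop: score = sum(1 for kw in keywords if kw in joined),
-- kept in the dict when positive
def pvScores (joined : String) : PySem.Dict String Int :=
  tacticKeywords.foldl (fun acc tk =>
    let score : Int := tk.2.foldl (fun s kw => if PySem.Str.isIn kw joined then s + 1 else s) 0
    if score > 0 then acc.insert tk.1 score else acc) (PySem.Dict.mk [])

-- A's tail: sort the score items by -score (stable), look at the first two entries.
-- The matches on the sorted list are the guarded indexings best[0]/best[1] of the
-- Python (the unreachable [] branch — scores is nonempty there — returns "").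
def pvPickSorted (scores : PySem.Dict String Int) : String :=
  if scores.items = [] then "Unclassified (inspect top terms)" else
  match PySem.List.sorted scores.items (fun x => -x.2) with
  | [] => ""
  | [b0] => b0.1
  | b0 :: b1 :: _ => if b0.2 == b1.2 then b0.1 ++ " / " ++ b1.1 else b0.1

-- A: score every tactic, keep positive scores in a dict, sort, inspect the prefix
def suggest_label_py (top_terms : List String) : String :=
  if top_terms = [] then "Unclassified" else
  pvPickSorted (pvScores (PySem.Str.lower (PySem.Str.join " " top_terms)))

-- ===== PORT B =====
-- B's loop body: score = len([kw for kw in keywords if kw in joined]); then update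
-- the running (best, first, second) state exactly as the Python if/elif does
def pvStep (joined : String) (st : Int × Option String × Option String)
    (tk : String × List String) : Int × Option String × Option String :=
  let score : Int := ((tk.2.filter (fun kw => PySem.Str.isIn kw joined)).length : Int)
  if st.1 < score then (score, some tk.1, none)
  else if score = st.1 ∧ 0 < score ∧ st.2.2 = none then (st.1, st.2.1, some tk.1)
  else st

-- B's final returns: first is None / second is not None / plain first
def pvLabel (st : Int × Option String × Option String) : String :=
  match st.2.1, st.2.2 with
  | none, _ => "Unclassified (inspect top terms)"
  | some f, some s => f ++ " / " ++ s
  | some f, none => f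

-- B: one streaming pass, no dict and no sort; at the end first/second decide the label
def suggest_label_py_alt (top_terms : List String) : String :=
  if top_terms = [] then "Unclassified" else
  pvLabel (tacticKeywords.foldl (pvStep (PySem.Str.lower (PySem.Str.join " " top_terms))) (0, none, none))

-- ===== PRECONDITION & SPEC =====
def Spec_suggest_label_py (top_terms : List String) (out : String) : Prop := out = suggest_label_py_alt top_terms
instance (top_terms : List String) (out : String) : Decidable (Spec_suggest_label_py top_terms out) := by unfold Spec_suggest_label_py; infer_instance

-- ===== CLAIM (what is proved, stated in full; the proofs are below) =====
def Claim_equal_suggest_label_py : Prop := ∀ (top_terms : List String), Dom_suggest_label_py top_terms → Spec_suggest_label_py top_terms (suggest_label_py top_terms)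

-- ===== LEMMAS AND PROOFS =====

-- B's score for one tactic (proofs-only shorthand)
def pvScoreB (joined : String) (kws : List String) : Int :=
  ((kws.filter (fun kw => PySem.Str.isIn kw joined)).length : Int)

-- the positive-score entries in table order: exactly A's dict contents
def pvPos (joined : String) (l : List (String × List String)) : List (String × Int) :=
  (l.map (fun tk => (tk.1, pvScoreB joined tk.2))).filter (fun p => decide (0 < p.2))

-- appending one table row appends its (positive) entry to the positives
theorem pvPos_append (joined : String) (l : List (String × List String)) (tk : String × List String) :
    pvPos joined (l ++ [tk])
      = pvPos joined l ++ (if 0 < pvScoreB joined tk.2 then [(tk.1, pvScoreB joined tk.2)] else []) := by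
  unfold pvPos
  rw [List.map_append, List.filter_append]
  congr 1
  by_cases h : 0 < pvScoreB joined tk.2 <;> simp [h]

-- the tied block: tactics of s whose score equals m, in order
def pvT (m : Int) (s : List (String × Int)) : List String :=
  (s.filter (fun p => decide (p.2 = m))).map Prod.fst

-- A's counting loop = length of the filtered keyword list
theorem pvScoreA_eq (joined : String) (kws : List String) :
    kws.foldl (fun s kw => if PySem.Str.isIn kw joined then s + 1 else s) 0
      = pvScoreB joined kws := by
  suffices h : ∀ a : Int, kws.foldl (fun s kw => if PySem.Str.isIn kw joined then s + 1 else s) a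
      = a + pvScoreB joined kws by simpa using h 0
  unfold pvScoreB
  induction kws with
  | nil => intro a; simp
  | cons kw t ih =>
    intro a
    rw [List.foldl_cons, List.filter_cons]
    by_cases hk : PySem.Str.isIn kw joined = true
    · rw [if_pos hk, if_pos hk, ih]
      simp only [List.length_cons]
      push_cast
      omega
    · rw [if_neg hk, if_neg hk, ih]

-- A's dict-building loop appends exactly the positive entries (fresh distinct keys)
theorem pvScores_items_aux (joined : String) :
    ∀ (l : List (String × List String)) (acc : PySem.Dict String Int),
    (∀ tk ∈ l, tk.1 ∉ acc.keys) → (l.map Prod.fst).Nodup →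
    (l.foldl (fun acc tk =>
        let score : Int := tk.2.foldl (fun s kw => if PySem.Str.isIn kw joined then s + 1 else s) 0
        if score > 0 then acc.insert tk.1 score else acc) acc).items
      = acc.items ++ pvPos joined l := by
  intro l
  induction l with
  | nil => intro acc _ _; simp [pvPos]
  | cons tk t ih =>
    intro acc hfresh hnd
    have htk : tk.1 ∉ acc.keys := hfresh tk (by simp)
    have hnd2 : (tk.1 :: t.map Prod.fst).Nodup := by simpa using hnd
    have hnd' : (t.map Prod.fst).Nodup := (List.nodup_cons.mp hnd2).2
    by_cases hpos : 0 < pvScoreB joined tk.2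
    · have hins : (acc.insert tk.1 (tk.2.foldl (fun s kw => if PySem.Str.isIn kw joined then s + 1 else s) 0)).items
          = acc.items ++ [(tk.1, pvScoreB joined tk.2)] := by
        rw [pvScoreA_eq]
        apply PySem.Dict.items_insert_of_not_contains
        simp [PySem.Dict.contains_eq_decide_mem_keys, htk]
      have hfresh' : ∀ p ∈ t, p.1 ∉ (acc.insert tk.1 (tk.2.foldl (fun s kw => if PySem.Str.isIn kw joined then s + 1 else s) 0)).keys := by
        intro p hp
        have hp1 : p.1 ≠ tk.1 := by
          have := (List.nodup_cons.mp hnd2).1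
          intro he; exact this (he ▸ List.mem_map.mpr ⟨p, hp, rfl⟩)
        have hpk : p.1 ∉ acc.keys := hfresh p (by simp [hp])
        simp only [PySem.Dict.keys] at hpk ⊢
        rw [hins, List.map_append]
        simp only [List.mem_append]
        rintro (h | h)
        · exact hpk h
        · simp at h; exact hp1 h
      simp only [List.foldl_cons]
      rw [if_pos (by rw [pvScoreA_eq]; exact hpos), ih _ hfresh' hnd', hins]
      simp [pvPos, hpos]
    · have hfresh' : ∀ p ∈ t, p.1 ∉ acc.keys := fun p hp => hfresh p (by simp [hp])
      simp only [List.foldl_cons]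
      rw [if_neg (by rw [pvScoreA_eq]; omega), ih _ hfresh' hnd']
      simp [pvPos, hpos]

-- the invariant of B's streaming pass, stated against the positive entries pvPos
theorem pvFold_inv (joined : String) (l : List (String × List String)) :
    let st := l.foldl (pvStep joined) (0, none, none)
    let s := pvPos joined l
    0 ≤ st.1 ∧ (∀ p ∈ s, p.2 ≤ st.1) ∧ (st.1 = 0 → s = []) ∧
    (0 < st.1 → ∃ p ∈ s, p.2 = st.1) ∧
    st.2.1 = (pvT st.1 s)[0]? ∧ st.2.2 = (pvT st.1 s)[1]? := by
  induction l using List.reverseRecOn with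
  | nil => simp [pvPos, pvT]
  | append_singleton l tk ih =>
    simp only [List.foldl_append, List.foldl_cons, List.foldl_nil]
    obtain ⟨h0, hle, hz, hex, hf, hs⟩ := ih
    set st := l.foldl (pvStep joined) (0, none, none) with hst
    set s := pvPos joined l with hsdef
    set c := pvScoreB joined tk.2 with hc
    have hspos : pvPos joined (l ++ [tk]) = s ++ if 0 < c then [(tk.1, c)] else [] := by
      rw [pvPos_append, ← hsdef, ← hc]
    rw [hspos]
    show (0 ≤ (pvStep joined st tk).1 ∧ _)
    unfold pvStep
    rw [show ((tk.2.filter (fun kw => PySem.Str.isIn kw joined)).length : Int) = c from rfl]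
    by_cases h1 : st.1 < c
    · rw [if_pos h1]
      have hcpos : 0 < c := by omega
      have hT : pvT c (s ++ [(tk.1, c)]) = [tk.1] := by
        unfold pvT
        rw [List.filter_append]
        have : s.filter (fun p => decide (p.2 = c)) = [] := by
          apply List.filter_eq_nil_iff.mpr
          intro p hp
          have := hle p hp
          simp; omega
        simp [this]
      refine ⟨by omega, ?_, by omega, ?_, ?_, ?_⟩
      · intro p hp
        rw [if_pos hcpos] at hp
        rcases List.mem_append.mp hp with h | h
        · have := hle p h; omega
        · obtain rfl := List.mem_singleton.mp h; simp
      · intro _; exact ⟨(tk.1, c), by simp [hcpos], rfl⟩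
      · simp [hcpos, hT]
      · simp [hcpos, hT]
    · rw [if_neg h1]
      by_cases h2 : c = st.1 ∧ 0 < c ∧ st.2.2 = none
      · rw [if_pos h2]
        obtain ⟨hce, hcpos, hsn⟩ := h2
        have hmpos : 0 < st.1 := by omega
        obtain ⟨p0, hp0, hp0e⟩ := hex hmpos
        have hTne : pvT st.1 s ≠ [] := by
          unfold pvT
          simp only [ne_eq, List.map_eq_nil_iff, List.filter_eq_nil_iff]
          intro hall
          exact absurd (by simpa using hp0e) (by simpa using hall p0 hp0)
        have hT1 : (pvT st.1 s).length = 1 := by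
          rcases hlen : pvT st.1 s with _ | ⟨a, _ | ⟨b, t⟩⟩
          · exact absurd hlen hTne
          · rfl
          · rw [hs, hlen] at hsn; simp at hsn
        have hT : pvT st.1 (s ++ [(tk.1, c)]) = pvT st.1 s ++ [tk.1] := by
          unfold pvT
          rw [List.filter_append]
          simp [hce]
        rw [if_pos hcpos, hT]
        obtain ⟨a, ha⟩ := List.length_eq_one_iff.mp hT1
        refine ⟨h0, ?_, by omega, fun h => ⟨p0, by simp [hp0], hp0e⟩, ?_, ?_⟩
        · intro p hp
          rcases List.mem_append.mp hp with h | h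
          · exact hle p h
          · obtain rfl := List.mem_singleton.mp h; simp [hce]
        · rw [hf, ha]; rfl
        · rw [ha]; rfl
      · rw [if_neg h2]
        by_cases hcpos : 0 < c
        · rw [if_pos hcpos]
          have hclt : c < st.1 ∨ (c = st.1 ∧ st.2.2 ≠ none) := by
            rcases lt_or_ge c st.1 with h | h
            · exact Or.inl h
            · have : c = st.1 := by omega
              refine Or.inr ⟨this, fun hn => h2 ⟨this, hcpos, hn⟩⟩
          rcases hclt with hlt | ⟨hce, hsn⟩
          · -- strictly smaller positive score: tied block unchanged
            have hT : pvT st.1 (s ++ [(tk.1, c)]) = pvT st.1 s := by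
              unfold pvT
              rw [List.filter_append]
              have : [( tk.1, c )].filter (fun p => decide (p.2 = st.1)) = [] := by
                simp; omega
              simp [this]
            refine ⟨h0, ?_, by omega, fun h => ?_, by rw [hf, hT], by rw [hs, hT]⟩
            · intro p hp
              rcases List.mem_append.mp hp with h | h
              · exact hle p h
              · obtain rfl := List.mem_singleton.mp h; simp; omega
            · obtain ⟨p0, hp0, he⟩ := hex h; exact ⟨p0, by simp [hp0], he⟩
          · -- tied but the second slot is already filled: T grows past index 1
            have hT : pvT st.1 (s ++ [(tk.1, c)]) = pvT st.1 s ++ [tk.1] := by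
              unfold pvT
              rw [List.filter_append]
              simp [hce]
            have hT2 : 2 ≤ (pvT st.1 s).length := by
              rcases hlen : pvT st.1 s with _ | ⟨a, _ | ⟨b, t⟩⟩
              · rw [hs, hlen] at hsn; simp at hsn
              · rw [hs, hlen] at hsn; simp at hsn
              · simp
            refine ⟨h0, ?_, by omega, fun h => ?_, ?_, ?_⟩
            · intro p hp
              rcases List.mem_append.mp hp with h | h
              · exact hle p h
              · obtain rfl := List.mem_singleton.mp h; simp [hce]
            · obtain ⟨p0, hp0, he⟩ := hex h; exact ⟨p0, by simp [hp0], he⟩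
            · rw [hf, hT, List.getElem?_append_left (by omega)]
            · rw [hs, hT, List.getElem?_append_left (by omega)]
        · -- zero score: the entry list is unchanged
          rw [if_neg hcpos]
          simp only [List.append_nil]
          exact ⟨h0, hle, hz, hex, hf, hs⟩

-- the table's tactic names are distinct (checked by computation)
theorem pvKeys_nodup : (tacticKeywords.map Prod.fst).Nodup := by decide

-- insertBy passes over a prefix it never inserts into
theorem pv_insertBy_append {α : Type} (before : α → α → Bool) (x : α) (l r : List α)
    (h : ∀ y ∈ l, before x y = false) :
    PySem.List.insertBy before x (l ++ r) = l ++ PySem.List.insertBy before x r := by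
  induction l with
  | nil => rfl
  | cons y l ih =>
    have hy : before x y = false := h y (by simp)
    have ih' := ih (fun y hy => h y (by simp [hy]))
    simp [PySem.List.insertBy, hy, ih']

-- insertBy puts x in front when x goes before everything
theorem pv_insertBy_front {α : Type} (before : α → α → Bool) (x : α) (r : List α)
    (h : ∀ y ∈ r, before x y = true) :
    PySem.List.insertBy before x r = x :: r := by
  cases r with
  | nil => rfl
  | cons y ys => simp [PySem.List.insertBy, h y (by simp)]

-- appending one element to a stable sort = one insertion
theorem pv_sorted_append_singleton {α : Type} (k : α → Int) (s : List α) (x : α) :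
    PySem.List.sorted (s ++ [x]) k =
      PySem.List.insertBy (fun a b => decide (k a < k b)) x (PySem.List.sorted s k) := by
  rw [PySem.List.sorted_eq_foldl_insertBy, PySem.List.sorted_eq_foldl_insertBy, List.foldl_append]
  rfl

-- stable sort puts the (equal-key) minimal-key block first, in original order
theorem pv_sorted_split {α : Type} (k : α → Int) (P : α → Bool) :
    ∀ s : List α,
    (∀ a ∈ s, ∀ b ∈ s, P a = true → P b = false → k a < k b) →
    (∀ a ∈ s, ∀ b ∈ s, P a = true → P b = true → k a = k b) →
    PySem.List.sorted s k = s.filter P ++ PySem.List.sorted (s.filter (fun y => !P y)) k := by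
  intro s
  induction s using List.reverseRecOn with
  | nil => intro _ _; rfl
  | append_singleton s x ih =>
    intro hsep hconst
    have hsep' : ∀ a ∈ s, ∀ b ∈ s, P a = true → P b = false → k a < k b :=
      fun a ha b hb => hsep a (List.mem_append_left _ ha) b (List.mem_append_left _ hb)
    have hconst' : ∀ a ∈ s, ∀ b ∈ s, P a = true → P b = true → k a = k b :=
      fun a ha b hb => hconst a (List.mem_append_left _ ha) b (List.mem_append_left _ hb)
    have hx : x ∈ s ++ [x] := List.mem_append_right _ (by simp)
    rw [pv_sorted_append_singleton, ih hsep' hconst']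
    by_cases hP : P x = true
    · rw [pv_insertBy_append _ _ _ _ (fun y hy => ?_), pv_insertBy_front _ _ _ (fun y hy => ?_)]
      · simp [List.filter_append, hP]
      · -- y in the sorted ¬P suffix: strictly larger key, so before
        have hy' := List.mem_filter.mp ((PySem.List.mem_sorted _ _ _ _).mp hy)
        have hyP : P y = false := by
          rcases hy' with ⟨_, hb⟩; cases hpy : P y <;> simp [hpy] at hb ⊢
        have := hsep x hx y (List.mem_append_left _ hy'.1) hP hyP
        simp [this]
      · -- y in the filtered-P prefix: equal keys, so not before
        have hy' := List.mem_filter.mp hy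
        have := hconst x hx y (List.mem_append_left _ hy'.1) hP hy'.2
        simp [this]
    · have hP' : P x = false := by cases hpx : P x <;> simp_all
      rw [pv_insertBy_append _ _ _ _ (fun y hy => ?_), ← pv_sorted_append_singleton]
      · simp [List.filter_append, hP']
      · -- y in the filtered-P prefix has strictly smaller key than x
        have hy' := List.mem_filter.mp hy
        have := hsep y (List.mem_append_left _ hy'.1) x hx hy'.2 hP'
        simp; omega

-- A's sorted-prefix inspection, rewritten as max value + tied block (over any item list)
theorem pv_tail_eq (s : List (String × Int)) :
    (if s = [] then "Unclassified (inspect top terms)" else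
      match PySem.List.sorted s (fun x => -x.2) with
      | [] => ""
      | [b0] => b0.1
      | b0 :: b1 :: _ => if b0.2 == b1.2 then b0.1 ++ " / " ++ b1.1 else b0.1)
    = (if s = [] then "Unclassified (inspect top terms)" else
      match PySem.List.max? (s.map (fun x => x.2)) (fun v => v) with
      | none => ""
      | some m =>
        match (s.filter (fun p => p.2 == m)).map Prod.fst with
        | [] => ""
        | [t0] => t0
        | t0 :: t1 :: _ => t0 ++ " / " ++ t1) := by
  by_cases hs : s = []
  · simp [hs]
  · rw [if_neg hs, if_neg hs]
    cases hm : PySem.List.max? (s.map (fun x => x.2)) (fun v => v) with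
    | none =>
      exact absurd (List.map_eq_nil_iff.mp ((PySem.List.max?_eq_none_iff _ _).mp hm)) hs
    | some m =>
      have hmem : m ∈ s.map (fun x => x.2) := PySem.List.max?_mem hm
      obtain ⟨p, hp, hpm⟩ := List.mem_map.mp hmem
      have hle : ∀ q ∈ s, q.2 ≤ m := fun q hq =>
        PySem.List.max?_isMax hm q.2 (List.mem_map.mpr ⟨q, hq, rfl⟩)
      have hsplit := pv_sorted_split (fun x => -x.2) (fun p => p.2 == m) s
        (fun a _ b hb hPa hPb => by
          have ha2 : a.2 = m := by simpa using hPa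
          have hb2 : b.2 ≠ m := by simpa using hPb
          have := hle b hb
          simp; omega)
        (fun a _ b _ hPa hPb => by
          have ha2 : a.2 = m := by simpa using hPa
          have hb2 : b.2 = m := by simpa using hPb
          simp [ha2, hb2])
      rw [hsplit]
      have hpf : p ∈ s.filter (fun p => p.2 == m) :=
        List.mem_filter.mpr ⟨hp, by simp [hpm]⟩
      cases e : s.filter (fun p => p.2 == m) with
      | nil => rw [e] at hpf; simp at hpf
      | cons p0 tl =>
        have hp0 : p0.2 = m := by
          have := List.mem_filter.mp (e ▸ List.mem_cons_self ..)
          simpa using this.2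
        cases tl with
        | cons p1 tl2 =>
          have hp1 : p1.2 = m := by
            have : p1 ∈ s.filter (fun p => p.2 == m) := by rw [e]; simp
            simpa using (List.mem_filter.mp this).2
          simp [e, hp0, hp1]
        | nil =>
          cases eR : PySem.List.sorted (s.filter (fun y => !(y.2 == m))) (fun x => -x.2) with
          | nil => simp [e]
          | cons q tlR =>
            have hq : q.2 ≠ m := by
              have := List.mem_filter.mp
                ((PySem.List.mem_sorted _ _ _ _).mp (eR ▸ List.mem_cons_self ..))
              simpa using this.2
            simp [e, hp0, Ne.symm hq]

-- A's tail on the scored dict  =  B's match on the fold state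
theorem pv_pick_eq_fold (joined : String) :
    pvPickSorted (pvScores joined)
      = pvLabel (tacticKeywords.foldl (pvStep joined) (0, none, none)) := by
  have hitems : (pvScores joined).items = pvPos joined tacticKeywords := by
    unfold pvScores
    rw [pvScores_items_aux joined tacticKeywords (PySem.Dict.mk [])
      (by intro tk _; simp [PySem.Dict.keys]) pvKeys_nodup]
    simp
  obtain ⟨h0, hle, hz, hex, hf, hsec⟩ := pvFold_inv joined tacticKeywords
  set st := tacticKeywords.foldl (pvStep joined) (0, none, none) with hst
  set s := pvPos joined tacticKeywords with hsdef
  unfold pvLabel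
  unfold pvPickSorted
  rw [hitems, pv_tail_eq]
  by_cases hs : s = []
  · -- no positive score: the fold never set `first`
    have hT : pvT st.1 s = [] := by simp [pvT, hs]
    rw [hf, hT]
    simp [hs]
  · rw [if_neg hs]
    have hmpos : 0 < st.1 := by
      rcases lt_or_eq_of_le h0 with h | h
      · exact h
      · exact absurd (hz h.symm) hs
    obtain ⟨p0, hp0, hp0e⟩ := hex hmpos
    -- the first extremal value returned by max? equals the fold's best score
    cases hm : PySem.List.max? (s.map (fun x => x.2)) (fun v => v) with
    | none => exact absurd (List.map_eq_nil_iff.mp ((PySem.List.max?_eq_none_iff _ _).mp hm)) hs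
    | some m =>
      have hmm : m = st.1 := by
        have h1 : m ≤ st.1 := by
          obtain ⟨q, hq, hqm⟩ := List.mem_map.mp (PySem.List.max?_mem hm)
          have := hle q hq; omega
        have h2 : st.1 ≤ m :=
          PySem.List.max?_isMax hm st.1 (List.mem_map.mpr ⟨p0, hp0, hp0e⟩)
        omega
      have hfilter : (s.filter (fun p => p.2 == m)).map Prod.fst = pvT st.1 s := by
        unfold pvT
        rw [hmm]
        rfl
      show (match (s.filter (fun p => p.2 == m)).map Prod.fst with
            | [] => ""
            | [t0] => t0
            | t0 :: t1 :: _ => t0 ++ " / " ++ t1)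
          = match st.2.1, st.2.2 with
            | none, _ => "Unclassified (inspect top terms)"
            | some f, some s => f ++ " / " ++ s
            | some f, none => f
      rw [hfilter, hf, hsec]
      rcases hTl : pvT st.1 s with _ | ⟨t0, _ | ⟨t1, tl⟩⟩
      · -- tied block empty: impossible (p0 witnesses st.1)
        exfalso
        have hmem : p0 ∈ s.filter (fun p => decide (p.2 = st.1)) :=
          List.mem_filter.mpr ⟨hp0, by simp [hp0e]⟩
        have hmemT : p0.1 ∈ pvT st.1 s := by
          unfold pvT
          exact List.mem_map.mpr ⟨p0, hmem, rfl⟩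
        rw [hTl] at hmemT
        simp at hmemT
      · simp
      · simp

-- ===== VERDICT (by name: the statement is the Claim_ definition above) =====
set_option maxRecDepth 10000 in
theorem suggest_label_py_spec : Claim_equal_suggest_label_py := by
  intro ts _
  unfold Spec_suggest_label_py suggest_label_py suggest_label_py_alt
  by_cases h : ts = []
  · subst h
    rw [if_pos rfl, if_pos rfl]
  · rw [if_neg h, if_neg h]
    exact pv_pick_eq_fold _
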